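-- pv_equiv track=rewrite | github.com/samvoigt/SamBasic | utils/midi2basic.py | decompose_duration
-- ===== SOURCE A (Python) =====
-- def decompose_duration(grids, length_table):
--     """Decompose a grid duration into a list of length tokens (greedy)."""
--     tokens = []
--     remaining = grids
--     for g, t in length_table:
--         while remaining >= g:
--             tokens.append((g, t))
--             remaining -= g
--     return tokens
-- ===== SOURCE B (Python) =====
-- def decompose_duration(grids, length_table):
--     """Decompose a grid duration into a list of length tokens (greedy)."""
--     counts = []
--     remaining = grids
--     for g, t in length_table:
--         q = remaining // g if g > 0 and remaining >= g else 0
--         counts.append(q)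
--         remaining -= q * g
--     return [(g, t) for (g, t), q in zip(length_table, counts) for _ in range(q)]
-- ===== Notes on version B (the rewrite author's own statement) =====
-- stated objective: idiomatic
-- what changed: Replaces the per-token repeated-subtraction inner while loop by a first pass computing the copy count of each table entry with floor division, then emits all tokens in a single comprehension over the table zipped with the counts.
import Mathlib
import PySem

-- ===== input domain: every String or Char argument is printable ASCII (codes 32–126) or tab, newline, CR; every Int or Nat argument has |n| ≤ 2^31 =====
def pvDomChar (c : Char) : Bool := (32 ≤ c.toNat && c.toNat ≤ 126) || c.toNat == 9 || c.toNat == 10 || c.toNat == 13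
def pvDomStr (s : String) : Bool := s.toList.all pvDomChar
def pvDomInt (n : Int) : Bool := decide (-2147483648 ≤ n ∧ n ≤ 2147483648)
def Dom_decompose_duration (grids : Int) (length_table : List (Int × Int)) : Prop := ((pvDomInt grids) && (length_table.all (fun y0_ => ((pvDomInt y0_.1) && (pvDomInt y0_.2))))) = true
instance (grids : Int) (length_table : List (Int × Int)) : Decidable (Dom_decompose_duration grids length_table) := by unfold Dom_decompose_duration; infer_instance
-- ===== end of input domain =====

-- B replaces the per-token repeated-subtraction inner while loop by a counts pass
-- (floor division per table entry) followed by one token-emitting comprehension (idiomatic).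

-- ===== PORT A =====
-- A's inner 'while remaining >= g: append; remaining -= g'. The '0 < g' conjunct is a
-- termination guard only: wherever the Python loop terminates (and so A returns at all),
-- a nonpositive g is only ever reached with remaining < g, so the guard never changes
-- what the Python computes on an input where it returns.
def innerLoop (g t : Int) (rem : Int) (acc : List (Int × Int)) : List (Int × Int) × Int :=
  if _h : 0 < g ∧ g ≤ rem then innerLoop g t (rem - g) (acc ++ [(g, t)])
  else (acc, rem)
termination_by rem.toNat
decreasing_by omega

def decompose_duration (grids : Int) (length_table : List (Int × Int)) : List (Int × Int) :=
  (length_table.foldl (fun st p => innerLoop p.1 p.2 st.2 st.1)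
    (([] : List (Int × Int)), grids)).1

-- ===== PORT B =====
-- first pass of Source B: the count of copies of each table entry
def countsOf (rem : Int) : List (Int × Int) → List Int
  | [] => []
  | p :: rest =>
    let q := if 0 < p.1 ∧ p.1 ≤ rem then PySem.Int.floordiv rem p.1 else 0
    q :: countsOf (rem - q * p.1) rest

def decompose_duration_alt (grids : Int) (length_table : List (Int × Int)) : List (Int × Int) :=
  (length_table.zip (countsOf grids length_table)).flatMap
    (fun pq => List.replicate pq.2.toNat pq.1)

-- ===== PRECONDITION & SPEC =====
def Spec_decompose_duration (grids : Int) (length_table : List (Int × Int)) (out : List (Int × Int)) : Prop := out = decompose_duration_alt grids length_table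
instance (grids : Int) (length_table : List (Int × Int)) (out : List (Int × Int)) : Decidable (Spec_decompose_duration grids length_table out) := by unfold Spec_decompose_duration; infer_instance

-- ===== CLAIM (what is proved, stated in full; the proofs are below) =====
def Claim_equal_decompose_duration : Prop := ∀ (grids : Int) (length_table : List (Int × Int)), Dom_decompose_duration grids length_table → Spec_decompose_duration grids length_table (decompose_duration grids length_table)

-- ===== LEMMAS AND PROOFS =====

-- the count emitted for one table entry
def qv (g rem : Int) : Int := if 0 < g ∧ g ≤ rem then PySem.Int.floordiv rem g else 0

lemma qv_step {g rem : Int} (hg : 0 < g) (hle : g ≤ rem) :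
    qv g rem = qv g (rem - g) + 1 := by
  have hne : g ≠ 0 := by omega
  unfold qv
  rw [if_pos ⟨hg, hle⟩]
  by_cases h2 : g ≤ rem - g
  · rw [if_pos ⟨hg, h2⟩]
    rw [PySem.Int.floordiv_eq_ediv_of_pos hg, PySem.Int.floordiv_eq_ediv_of_pos hg]
    have h3 : (rem - g + 1 * g) / g = (rem - g) / g + 1 := Int.add_mul_ediv_right _ _ hne
    rw [show rem - g + 1 * g = rem from by ring] at h3
    omega
  · rw [if_neg (by omega)]
    have h1 : PySem.Int.floordiv rem g = 1 := by
      rw [PySem.Int.floordiv_eq_iff_of_pos hg]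
      constructor <;> nlinarith
    omega

lemma qv_nonneg (g rem : Int) : 0 ≤ qv g rem := by
  unfold qv
  split_ifs with h
  · rw [PySem.Int.floordiv_eq_ediv_of_pos h.1]
    exact Int.ediv_nonneg (by omega) (by omega)
  · exact le_refl 0

lemma innerLoop_spec (g t : Int) : ∀ (rem : Int) (acc : List (Int × Int)),
    innerLoop g t rem acc = (acc ++ List.replicate (qv g rem).toNat (g, t), rem - qv g rem * g) := by
  intro rem acc
  fun_induction innerLoop g t rem acc with
  | case1 rem acc h ih =>
    rw [ih, qv_step h.1 h.2]
    have hq := qv_nonneg g (rem - g)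
    rw [Prod.mk.injEq]
    refine ⟨?_, by ring⟩
    rw [List.append_assoc]
    congr 1
    have : (qv g (rem - g) + 1).toNat = (qv g (rem - g)).toNat + 1 := by omega
    rw [this, List.replicate_succ]
    rfl
  | case2 rem acc h =>
    have : qv g rem = 0 := by
      unfold qv; rw [if_neg h]
    simp [this]

lemma fold_spec (lt : List (Int × Int)) : ∀ (rem : Int) (acc : List (Int × Int)),
    (lt.foldl (fun st p => innerLoop p.1 p.2 st.2 st.1) (acc, rem)).1
      = acc ++ (lt.zip (countsOf rem lt)).flatMap (fun pq => List.replicate pq.2.toNat pq.1) := by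
  induction lt with
  | nil => intro rem acc; simp [countsOf]
  | cons p rest ih =>
    intro rem acc
    have hstep : innerLoop p.1 p.2 (acc, rem).2 (acc, rem).1
        = (acc ++ List.replicate (qv p.1 rem).toNat p, rem - qv p.1 rem * p.1) := by
      simpa using innerLoop_spec p.1 p.2 rem acc
    have hc : countsOf rem (p :: rest) = qv p.1 rem :: countsOf (rem - qv p.1 rem * p.1) rest := rfl
    rw [List.foldl_cons, hstep, ih, hc, List.zip_cons_cons, List.flatMap_cons, List.append_assoc]

-- ===== VERDICT (by name: the statement is the Claim_ definition above) =====
theorem decompose_duration_spec : Claim_equal_decompose_duration := by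
  intro grids lt _
  unfold Spec_decompose_duration decompose_duration decompose_duration_alt
  simpa using fold_spec lt grids []
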